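-- pv_equiv track=rewrite | github.com/BadWolf1023/QueueBotMultiServer | cogs/Queue.py | strip_prefix_and_command
-- ===== SOURCE A (Python) =====
-- def strip_prefix(message:str, prefix="!"):
--     message = message.strip()
--     if message.startswith(prefix):
--         return message[len(prefix):]
--
-- def strip_prefix_and_command(message:str, valid_terms:set, prefix="!"):
--     message = strip_prefix(message, prefix)
--     args = message.split()
--     if len(args) == 0:
--         return message
--     for term in sorted(valid_terms, key=lambda x:-len(x)):
--         if message.lower().startswith(term):
--             message = message[len(term):]
--             break
--     return message.strip()
-- ===== SOURCE B (Python) =====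
-- def strip_prefix(message: str, prefix="!"):
--     message = message.strip()
--     if message.startswith(prefix):
--         return message[len(prefix):]
--
--
-- def strip_prefix_and_command(message: str, valid_terms: set, prefix="!"):
--     message = strip_prefix(message, prefix)
--     args = message.split()
--     if len(args) == 0:
--         return message
--     low = message.lower()
--     best_len = -1
--     for term in valid_terms:
--         if len(term) > best_len and low.startswith(term):
--             best_len = len(term)
--     if best_len >= 0:
--         message = message[best_len:]
--     return message.strip()
-- ===== Notes on version B (the rewrite author's own statement) =====
-- stated objective: faster
-- what changed: replaces the sort-then-first-match loop by a single unsorted linear scan that keeps the length of the longest term matching the lowercased message (no sort, no break), then slices once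
import Mathlib
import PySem

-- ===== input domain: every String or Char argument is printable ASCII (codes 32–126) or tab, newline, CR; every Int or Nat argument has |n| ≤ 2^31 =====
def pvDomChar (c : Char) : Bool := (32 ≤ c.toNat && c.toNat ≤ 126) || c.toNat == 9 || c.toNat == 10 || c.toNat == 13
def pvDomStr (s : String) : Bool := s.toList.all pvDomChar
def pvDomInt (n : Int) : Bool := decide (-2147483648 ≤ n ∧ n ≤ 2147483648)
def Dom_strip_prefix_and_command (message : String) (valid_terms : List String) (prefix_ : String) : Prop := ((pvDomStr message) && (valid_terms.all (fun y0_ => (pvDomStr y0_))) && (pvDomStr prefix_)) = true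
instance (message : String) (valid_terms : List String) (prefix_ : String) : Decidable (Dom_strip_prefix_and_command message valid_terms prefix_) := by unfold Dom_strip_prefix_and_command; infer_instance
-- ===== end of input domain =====

-- B replaces A's sort-then-first-match loop by a single unsorted linear scan that keeps the longest matching term's length (the sort is removed).

-- ===== PORT A =====
-- shared helper: Python strip_prefix (some = the stripped remainder, none = Python's None)
def pvStripPrefix (message : String) (prefix_ : String) : Option String :=
  let m := PySem.Str.strip message
  if PySem.Str.startswith m prefix_ then
    some (PySem.Str.slice m (some (PySem.Str.len prefix_ : Int)) none)
  else none

-- A's for-loop with break over the sorted terms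
def pvALoop (message : String) : List String → String
  | [] => message
  | t :: ts =>
    if PySem.Str.startswith (PySem.Str.lower message) t then
      PySem.Str.slice message (some (PySem.Str.len t : Int)) none
    else pvALoop message ts

def strip_prefix_and_command (message : String) (valid_terms : List String) (prefix_ : String) : String :=
  match pvStripPrefix message prefix_ with
  | none => ""   -- Python raises AttributeError here (None.split); excluded by Pre_
  | some m =>
    let args := PySem.Str.split₀ m
    if args.length = 0 then m
    else PySem.Str.strip (pvALoop m (PySem.List.sorted valid_terms (fun x => -(PySem.Str.len x : Int)) false))

-- ===== PORT B =====
-- B's single scan: best_len = length of the longest term matching the lowercased message, -1 if none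
def pvBLoop (low : String) : List String → Int → Int
  | [], bestLen => bestLen
  | t :: ts, bestLen =>
    if (PySem.Str.len t : Int) > bestLen && PySem.Str.startswith low t then
      pvBLoop low ts (PySem.Str.len t : Int)
    else pvBLoop low ts bestLen

def strip_prefix_and_command_alt (message : String) (valid_terms : List String) (prefix_ : String) : String :=
  match pvStripPrefix message prefix_ with
  | none => ""   -- Python raises AttributeError here (None.split); excluded by Pre_
  | some m =>
    let args := PySem.Str.split₀ m
    if args.length = 0 then m
    else
      let low := PySem.Str.lower m
      let bestLen := pvBLoop low valid_terms (-1)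
      let m' := if bestLen ≥ 0 then PySem.Str.slice m (some bestLen) none else m
      PySem.Str.strip m'

-- ===== PRECONDITION & SPEC =====
-- Pre_ excludes exactly the inputs on which strip_prefix returns None (the stripped message
-- does not start with the prefix), where Python A (and B) raise AttributeError on None.split().
def Pre_strip_prefix_and_command (message : String) (valid_terms : List String) (prefix_ : String) : Prop :=
  PySem.Str.startswith (PySem.Str.strip message) prefix_ = true
instance (message : String) (valid_terms : List String) (prefix_ : String) : Decidable (Pre_strip_prefix_and_command message valid_terms prefix_) := by unfold Pre_strip_prefix_and_command; infer_instance

def pvWitness_strip_prefix_and_command : String × List String × String := ("!ban alice", ["ban", "b"], "!")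

def Spec_strip_prefix_and_command (message : String) (valid_terms : List String) (prefix_ : String) (out : String) : Prop := out = strip_prefix_and_command_alt message valid_terms prefix_
instance (message : String) (valid_terms : List String) (prefix_ : String) (out : String) : Decidable (Spec_strip_prefix_and_command message valid_terms prefix_ out) := by unfold Spec_strip_prefix_and_command; infer_instance

-- ===== CLAIM (what is proved, stated in full; the proofs are below) =====
def Claim_equal_strip_prefix_and_command : Prop := ∀ (message : String) (valid_terms : List String) (prefix_ : String), Dom_strip_prefix_and_command message valid_terms prefix_ → Pre_strip_prefix_and_command message valid_terms prefix_ → Spec_strip_prefix_and_command message valid_terms prefix_ (strip_prefix_and_command message valid_terms prefix_)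

-- ===== LEMMAS AND PROOFS =====

theorem pv_aloop_none (m : String) : ∀ (l : List String),
    (∀ u ∈ l, PySem.Str.startswith (PySem.Str.lower m) u = false) → pvALoop m l = m := by
  intro l
  induction l with
  | nil => intro _; rfl
  | cons a ts ih =>
    intro h
    simp only [pvALoop, h a (List.mem_cons_self), Bool.false_eq_true, if_false]
    exact ih (fun u hu => h u (List.mem_cons_of_mem a hu))

theorem pv_aloop_some (m : String) : ∀ (l : List String),
    l.Pairwise (fun a b => (fun x => -(PySem.Str.len x : Int)) a ≤ (fun x => -(PySem.Str.len x : Int)) b) →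
    ∀ t ∈ l, PySem.Str.startswith (PySem.Str.lower m) t = true →
    ∃ n : Int,
      (∃ t' ∈ l, PySem.Str.startswith (PySem.Str.lower m) t' = true ∧ n = (PySem.Str.len t' : Int)) ∧
      pvALoop m l = PySem.Str.slice m (some n) none ∧
      ∀ u ∈ l, PySem.Str.startswith (PySem.Str.lower m) u = true → (PySem.Str.len u : Int) ≤ n := by
  intro l
  induction l with
  | nil => intro _ t ht; cases ht
  | cons a ts ih =>
    intro hp t ht hpt
    by_cases ha : PySem.Str.startswith (PySem.Str.lower m) a = true
    · refine ⟨(PySem.Str.len a : Int), ⟨a, List.mem_cons_self, ha, rfl⟩, by simp only [pvALoop, ha, if_true], ?_⟩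
      intro u hu hpu
      rcases List.mem_cons.mp hu with rfl | hu
      · exact le_refl _
      · have := (List.pairwise_cons.mp hp).1 u hu
        dsimp only at this; omega
    · have ht' : t ∈ ts := by
        rcases List.mem_cons.mp ht with rfl | h
        · exact absurd hpt ha
        · exact h
      obtain ⟨n, ⟨t', ht'', hpt'', hn⟩, heq, hb⟩ := ih (List.pairwise_cons.mp hp).2 t ht' hpt
      refine ⟨n, ⟨t', List.mem_cons_of_mem a ht'', hpt'', hn⟩,
        by simp only [pvALoop, ha, Bool.false_eq_true, if_false]; exact heq, ?_⟩
      intro u hu hpu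
      rcases List.mem_cons.mp hu with rfl | hu
      · exact absurd hpu ha
      · exact hb u hu hpu

theorem pv_bloop_spec (low : String) : ∀ (l : List String) (bl : Int),
    (pvBLoop low l bl = bl ∧ ∀ u ∈ l, PySem.Str.startswith low u = true → (PySem.Str.len u : Int) ≤ bl)
    ∨ (∃ t ∈ l, PySem.Str.startswith low t = true ∧ pvBLoop low l bl = (PySem.Str.len t : Int) ∧
        bl < (PySem.Str.len t : Int) ∧
        ∀ u ∈ l, PySem.Str.startswith low u = true → (PySem.Str.len u : Int) ≤ pvBLoop low l bl) := by
  intro l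
  induction l with
  | nil => intro bl; left; exact ⟨rfl, by simp⟩
  | cons a ts ih =>
    intro bl
    by_cases hc : (decide ((PySem.Str.len a : Int) > bl) && PySem.Str.startswith low a) = true
    · have hstep : pvBLoop low (a :: ts) bl = pvBLoop low ts (PySem.Str.len a : Int) := by
        simp only [pvBLoop, hc, if_true]
      simp only [Bool.and_eq_true, decide_eq_true_eq] at hc
      obtain hc : bl < (PySem.Str.len a : Int) ∧ PySem.Str.startswith low a = true := ⟨hc.1, hc.2⟩
      rcases ih (PySem.Str.len a : Int) with ⟨he, hb⟩ | ⟨t, htm, hpt, he, hlt, hb⟩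
      · right
        refine ⟨a, List.mem_cons_self, hc.2, by rw [hstep, he], hc.1, ?_⟩
        intro u hu hpu
        rcases List.mem_cons.mp hu with rfl | hu
        · rw [hstep, he]
        · rw [hstep, he]; exact hb u hu hpu
      · right
        refine ⟨t, List.mem_cons_of_mem a htm, hpt, by rw [hstep, he], by omega, ?_⟩
        intro u hu hpu
        rcases List.mem_cons.mp hu with rfl | hu
        · rw [hstep, he]; omega
        · rw [hstep]; exact hb u hu hpu
    · have hstep : pvBLoop low (a :: ts) bl = pvBLoop low ts bl := by
        simp only [pvBLoop, if_neg hc]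
      have hc : ¬(bl < (PySem.Str.len a : Int) ∧ PySem.Str.startswith low a = true) := by
        intro h; exact hc (by simp only [Bool.and_eq_true, decide_eq_true_eq]; exact ⟨h.1, h.2⟩)
      rcases ih bl with ⟨he, hb⟩ | ⟨t, htm, hpt, he, hlt, hb⟩
      · left
        refine ⟨by rw [hstep, he], ?_⟩
        intro u hu hpu
        rcases List.mem_cons.mp hu with rfl | hu
        · by_contra h; exact hc ⟨by omega, hpu⟩
        · exact hb u hu hpu
      · right
        refine ⟨t, List.mem_cons_of_mem a htm, hpt, by rw [hstep, he], hlt, ?_⟩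
        intro u hu hpu
        rcases List.mem_cons.mp hu with rfl | hu
        · rw [hstep, he]; by_cases h : (PySem.Str.len u : Int) ≤ bl
          · omega
          · exact absurd ⟨by omega, hpu⟩ hc
        · rw [hstep]; exact hb u hu hpu

-- ===== VERDICT (by name: the statement is the Claim_ definition above) =====
theorem strip_prefix_and_command_spec : Claim_equal_strip_prefix_and_command := by
  intro message vt prefix_ hdom hpre
  unfold Spec_strip_prefix_and_command strip_prefix_and_command strip_prefix_and_command_alt pvStripPrefix
  have hpre' := hpre
  unfold Pre_strip_prefix_and_command at hpre'
  simp only [hpre', if_true]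
  set m := PySem.Str.slice (PySem.Str.strip message) (some (PySem.Str.len prefix_ : Int)) none with hm
  by_cases hargs : (PySem.Str.split₀ m).length = 0
  · simp [hargs]
  · simp only [hargs, if_false]
    rcases pv_bloop_spec (PySem.Str.lower m) vt (-1) with ⟨he, hb⟩ | ⟨t, htm, hpt, he, hlt, hb⟩
    · have hnone : ∀ u ∈ PySem.List.sorted vt (fun x => -(PySem.Str.len x : Int)) false,
          PySem.Str.startswith (PySem.Str.lower m) u = false := by
        intro u hu
        have hu' : u ∈ vt := (PySem.List.mem_sorted _ _ _ _).mp hu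
        by_contra h
        have hpu : PySem.Str.startswith (PySem.Str.lower m) u = true := by
          cases hx : PySem.Str.startswith (PySem.Str.lower m) u
          · exact absurd hx h
          · rfl
        have := hb u hu' hpu
        have : (0 : Int) ≤ (PySem.Str.len u : Int) := Int.natCast_nonneg _
        omega
      rw [pv_aloop_none m _ hnone, he]
      norm_num
    · obtain ⟨n, ⟨t', ht', hpt', hn⟩, heq, hbA⟩ :=
        pv_aloop_some m _ (PySem.List.sorted_pairwise vt (fun x => -(PySem.Str.len x : Int)))
          t ((PySem.List.mem_sorted _ _ _ _).mpr htm) hpt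
      have h1 : (PySem.Str.len t : Int) ≤ n :=
        hbA t ((PySem.List.mem_sorted _ _ _ _).mpr htm) hpt
      have h2 : (PySem.Str.len t' : Int) ≤ pvBLoop (PySem.Str.lower m) vt (-1) :=
        hb t' ((PySem.List.mem_sorted _ _ _ _).mp ht') hpt'
      have hne : pvBLoop (PySem.Str.lower m) vt (-1) = n := by omega
      have hge : pvBLoop (PySem.Str.lower m) vt (-1) ≥ 0 := by
        have : (0 : Int) ≤ (PySem.Str.len t : Int) := Int.natCast_nonneg _
        omega
      rw [heq, if_pos hge, hne]
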